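-- pv_equiv track=rewrite | github.com/typingmonk/mnd_ADIZ_news_crawler | function/extractFlightRecords.py | extract_records_mode1
-- ===== SOURCE A (Python) =====
-- def extract_records_mode1(p_texts):
-- 	crafts    = [p_text for i, p_text in enumerate(p_texts) if i % 2 == 0]
-- 	crafts_en = [p_text for i, p_text in enumerate(p_texts) if i % 2 == 1]
-- 	flight_cnts = list(map(get_digit, [c.split()[-1] for c in crafts]))
-- 	flight_cnts = [cnt[0] for cnt in flight_cnts]
-- 	crafts = [c.split()[0] for c in crafts]
-- 	crafts_en = [c[c.find(" ")+1:] for c in crafts_en]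
-- 	return flight_cnts, crafts, crafts_en
--
-- def get_digit(text):
-- 	return list(filter(is_digit, text))
--
-- def is_digit(t):
-- 	return t in ("0","1","2","3","4","5","6","7","8","9")
-- ===== SOURCE B (Python) =====
-- def extract_records_mode1(p_texts):
--     flight_cnts, crafts, crafts_en = [], [], []
--     for i, p_text in enumerate(p_texts):
--         if i % 2 == 0:
--             tokens = p_text.split()
--             crafts.append(tokens[0])
--             flight_cnts.append(next(ch for ch in tokens[-1] if ch in "0123456789"))
--         else:
--             crafts_en.append(p_text[p_text.find(" ") + 1:])
--     return flight_cnts, crafts, crafts_en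
-- ===== Notes on version B (the rewrite author's own statement) =====
-- stated objective: simpler
-- what changed: A's four sequential comprehensions (two enumerate filters plus re-splitting each craft string and filtering all digits of the last token) are fused into one loop over enumerate(p_texts) that splits each even-index element once and takes only the first digit of its last token.
import Mathlib
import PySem

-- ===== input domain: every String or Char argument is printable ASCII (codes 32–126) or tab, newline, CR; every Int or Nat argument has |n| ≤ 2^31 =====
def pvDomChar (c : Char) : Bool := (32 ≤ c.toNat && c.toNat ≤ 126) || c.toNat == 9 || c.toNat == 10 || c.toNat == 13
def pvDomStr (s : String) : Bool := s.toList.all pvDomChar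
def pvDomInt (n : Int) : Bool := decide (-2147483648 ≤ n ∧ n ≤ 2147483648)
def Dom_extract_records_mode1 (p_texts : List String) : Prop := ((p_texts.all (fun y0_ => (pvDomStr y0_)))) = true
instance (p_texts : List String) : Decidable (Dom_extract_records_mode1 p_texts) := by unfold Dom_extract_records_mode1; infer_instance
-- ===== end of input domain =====

-- B fuses A's four comprehension passes into one loop over enumerate, taking the first digit
-- of the last token directly instead of filtering all digits and indexing (objective: simpler).
-- Mutation note: neither program mutates its argument.

-- ===== PORT A =====
-- is_digit(t): t in ("0",…,"9")
def pvIsDigitA (t : Char) : Bool := ['0','1','2','3','4','5','6','7','8','9'].contains t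
-- get_digit(text): list(filter(is_digit, text)) (a list of one-character strings)
def pvGetDigit (text : String) : List String :=
  (text.toList.filter pvIsDigitA).map (fun c => String.ofList [c])

def extract_records_mode1 (p_texts : List String) : List String × List String × List String :=
  let crafts := (PySem.List.enumerate p_texts 0).filterMap
    (fun p => if p.1 % 2 = 0 then some p.2 else none)
  let crafts_en := (PySem.List.enumerate p_texts 0).filterMap
    (fun p => if p.1 % 2 = 1 then some p.2 else none)
  let flight_cnts := (crafts.map (fun c => PySem.List.pyGetD (PySem.Str.split₀ c) (-1) "")).map pvGetDigit
  let flight_cnts := flight_cnts.map (fun cnt => PySem.List.pyGetD cnt 0 "")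
  let crafts := crafts.map (fun c => PySem.List.pyGetD (PySem.Str.split₀ c) 0 "")
  let crafts_en := crafts_en.map (fun c => PySem.Str.slice c (some (PySem.Str.find c " " + 1)) none)
  (flight_cnts, crafts, crafts_en)

-- ===== PORT B =====
-- next(ch for ch in t if ch in "0123456789") as a one-character string
def pvFirstDigit (t : String) : String :=
  ((t.toList.find? (fun ch => "0123456789".toList.contains ch)).map (fun c => String.ofList [c])).getD ""

-- the fused loop: `even` says whether the current element's index is even
def pvAltGo (ps : List String) (even : Bool) : List String × List String × List String :=
  match ps with
  | [] => ([], [], [])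
  | t :: rest =>
    let r := pvAltGo rest (!even)
    if even then
      let toks := PySem.Str.split₀ t
      (pvFirstDigit (PySem.List.pyGetD toks (-1) "") :: r.1,
       PySem.List.pyGetD toks 0 "" :: r.2.1,
       r.2.2)
    else
      (r.1, r.2.1, (PySem.Str.slice t (some (PySem.Str.find t " " + 1)) none) :: r.2.2)

def extract_records_mode1_alt (p_texts : List String) : List String × List String × List String :=
  pvAltGo p_texts true

-- ===== PRECONDITION & SPEC =====
-- Pre_ excludes exactly the inputs on which the Python A raises IndexError: an even-index
-- element that is all whitespace (split() empty) or whose last whitespace-separated token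
-- contains no digit (B raises there too).
def Pre_extract_records_mode1 (p_texts : List String) : Prop :=
  ∀ p ∈ p_texts.zipIdx, p.2 % 2 = 0 →
    (p.1.toList.any (fun c => !PySem.Chars.isspace c) = true ∧
     ((p.1.toList.reverse.dropWhile (fun c => PySem.Chars.isspace c)).takeWhile
        (fun c => !PySem.Chars.isspace c)).any
        (fun c => ['0', '1', '2', '3', '4', '5', '6', '7', '8', '9'].contains c) = true)
instance (p_texts : List String) : Decidable (Pre_extract_records_mode1 p_texts) := by
  unfold Pre_extract_records_mode1; infer_instance

def pvWitness_extract_records_mode1 : List String := ["B747 x 3", "B747 Boeing 747"]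

def Spec_extract_records_mode1 (p_texts : List String) (out : List String × List String × List String) : Prop := out = extract_records_mode1_alt p_texts
instance (p_texts : List String) (out : List String × List String × List String) : Decidable (Spec_extract_records_mode1 p_texts out) := by unfold Spec_extract_records_mode1; infer_instance

-- ===== CLAIM (what is proved, stated in full; the proofs are below) =====
def Claim_equal_extract_records_mode1 : Prop := ∀ (p_texts : List String), Dom_extract_records_mode1 p_texts → Pre_extract_records_mode1 p_texts → Spec_extract_records_mode1 p_texts (extract_records_mode1 p_texts)

-- ===== LEMMAS AND PROOFS =====

-- proof-side helper: the elements at positions where the alternating flag is true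
def pvPick {α : Type} (b : Bool) : List α → List α
  | [] => []
  | x :: r => if b then x :: pvPick (!b) r else pvPick (!b) r

theorem pvSel_even (xs : List String) (s : Int) :
    (PySem.List.enumerate xs s).filterMap (fun p => if p.1 % 2 = 0 then some p.2 else none)
      = pvPick (s % 2 == 0) xs := by
  induction xs generalizing s with
  | nil => simp [PySem.List.enumerate, pvPick]
  | cons x r ih =>
    rw [PySem.List.enumerate_cons, List.filterMap_cons]
    by_cases h : s % 2 = 0
    · rw [show (if (s, x).1 % 2 = 0 then some (s, x).2 else none) = some x from by simp [h], ih (s + 1), show ((s + 1) % 2 == 0) = false from by rw [beq_eq_false_iff_ne]; omega,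
          show (s % 2 == 0) = true from beq_iff_eq.mpr h]
      simp [pvPick]
    · rw [show (if (s, x).1 % 2 = 0 then some (s, x).2 else none) = none from by simp [h], ih (s + 1), show ((s + 1) % 2 == 0) = true from beq_iff_eq.mpr (by omega),
          show (s % 2 == 0) = false from by rw [beq_eq_false_iff_ne]; omega]
      simp [pvPick]

theorem pvSel_odd (xs : List String) (s : Int) :
    (PySem.List.enumerate xs s).filterMap (fun p => if p.1 % 2 = 1 then some p.2 else none)
      = pvPick (s % 2 == 1) xs := by
  induction xs generalizing s with
  | nil => simp [PySem.List.enumerate, pvPick]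
  | cons x r ih =>
    rw [PySem.List.enumerate_cons, List.filterMap_cons]
    by_cases h : s % 2 = 1
    · rw [show (if (s, x).1 % 2 = 1 then some (s, x).2 else none) = some x from by simp [h], ih (s + 1), show ((s + 1) % 2 == 1) = false from by rw [beq_eq_false_iff_ne]; omega,
          show (s % 2 == 1) = true from beq_iff_eq.mpr h]
      simp [pvPick]
    · rw [show (if (s, x).1 % 2 = 1 then some (s, x).2 else none) = none from by simp [h], ih (s + 1), show ((s + 1) % 2 == 1) = true from beq_iff_eq.mpr (by omega),
          show (s % 2 == 1) = false from by rw [beq_eq_false_iff_ne]; omega]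
      simp [pvPick]

theorem pvAltGo_eq (ps : List String) (b : Bool) :
    pvAltGo ps b =
      ((pvPick b ps).map (fun c => pvFirstDigit (PySem.List.pyGetD (PySem.Str.split₀ c) (-1) "")),
       (pvPick b ps).map (fun c => PySem.List.pyGetD (PySem.Str.split₀ c) 0 ""),
       (pvPick (!b) ps).map (fun c => PySem.Str.slice c (some (PySem.Str.find c " " + 1)) none)) := by
  induction ps generalizing b with
  | nil => simp [pvAltGo, pvPick]
  | cons t r ih =>
    cases b <;> simp [pvAltGo, pvPick, ih]

theorem pvDigit_pointwise (t : String) :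
    PySem.List.pyGetD (pvGetDigit t) 0 "" = pvFirstDigit t := by
  have hp : (fun ch : Char => "0123456789".toList.contains ch) = pvIsDigitA := by
    funext c
    have hchars : "0123456789".toList = ['0', '1', '2', '3', '4', '5', '6', '7', '8', '9'] := by
      decide
    rw [hchars]; rfl
  unfold pvFirstDigit
  rw [hp]
  simp [pvGetDigit, PySem.List.pyGetD_zero, List.getD_eq_getElem?_getD,
        ← List.head?_eq_getElem?, List.head?_map, List.head?_filter]

-- ===== VERDICT (by name: the statement is the Claim_ definition above) =====
theorem extract_records_mode1_spec : Claim_equal_extract_records_mode1 := by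
  intro p_texts _ _
  unfold Spec_extract_records_mode1 extract_records_mode1 extract_records_mode1_alt
  rw [pvSel_even, pvSel_odd, pvAltGo_eq]
  simp [List.map_map, Function.comp_def, pvDigit_pointwise]
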